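-- pv_equiv track=rewrite | github.com/chachabai/chachabai.github.io | cf/contest/main.py | f
-- ===== SOURCE A (Python) =====
-- def f(n):
-- 	ra, rb = 0, 1
-- 	a, b = 1, 0
-- 	while n > 0:
-- 		if n % 2 == 1:
-- 			ra2, rb2 = ra * a, rb * b
-- 			ra, rb = ra2 + rb * a + ra * b, ra2 + rb2
-- 		a2, b2 = a * a, b * b
-- 		a, b = a2 + b2 * 2, a2 + b2
-- 		n //= 2
-- 	return ra
-- ===== SOURCE B (Python) =====
-- def f(n):
--     # product, in the commutative ring Z[M]/(M^2 - M - 1), of one factor per set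
--     # bit of n; combined top-down (most-significant bit first), the reverse of A.
--     def mul(p, q):
--         pa, pb = p
--         qa, qb = q
--         return (pa * (qa + qb) + pb * qa, pa * qa + pb * qb)
--
--     def go(m, e):
--         if m <= 0:
--             return (0, 1)
--         x, y = e
--         rest = go(m // 2, (x * x + 2 * y * y, x * x + y * y))
--         return mul(rest, e) if m % 2 == 1 else rest
--
--     return go(n, (1, 0))[0]
-- ===== Notes on version B (the rewrite author's own statement) =====
-- stated objective: alternative
-- what changed: Replaces A's bottom-up while-loop that multiplies each selected per-bit factor into a running (ra, rb) accumulator by a top-down recursion on n that combines the same commuting ring factors in the opposite, most-significant-bit-first order via an explicit ring-product helper; correctness rests on commutativity/associativity of the product in Z[M]/(M^2-M-1), proved in Lean.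
import Mathlib
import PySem

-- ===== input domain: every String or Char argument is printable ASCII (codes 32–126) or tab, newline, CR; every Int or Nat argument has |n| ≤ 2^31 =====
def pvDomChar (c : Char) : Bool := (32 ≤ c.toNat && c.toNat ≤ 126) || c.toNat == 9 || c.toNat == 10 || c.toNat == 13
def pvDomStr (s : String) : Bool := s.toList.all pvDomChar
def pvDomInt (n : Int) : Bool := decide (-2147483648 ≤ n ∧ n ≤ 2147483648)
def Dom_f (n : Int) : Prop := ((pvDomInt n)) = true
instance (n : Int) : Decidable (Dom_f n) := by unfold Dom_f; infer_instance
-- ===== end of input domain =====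

-- B replaces A's bottom-up accumulator loop by a top-down recursion that combines the
-- per-bit ring factors in the opposite (most-significant-bit-first) order; same cost (objective: alternative).

-- ===== PORT A =====
-- A's while-loop as recursion on the loop state (ra, rb, a, b), halving n each step.
def fLoop (n ra rb a b : Int) : Int :=
  if _h : n > 0 then
    let rab :=
      if PySem.Int.mod n 2 = 1 then
        let ra2 := ra * a
        let rb2 := rb * b
        (ra2 + rb * a + ra * b, ra2 + rb2)
      else (ra, rb)
    let a2 := a * a
    let b2 := b * b
    fLoop (PySem.Int.floordiv n 2) rab.1 rab.2 (a2 + b2 * 2) (a2 + b2)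
  else ra
termination_by n.toNat
decreasing_by
  have : PySem.Int.floordiv n 2 = n / 2 := PySem.Int.floordiv_eq_ediv_of_pos (by omega)
  omega

def f (n : Int) : Int := fLoop n 0 1 1 0

-- ===== PORT B =====
-- Source B's `mul`: the product in the commutative ring Z[M]/(M^2 - M - 1)
def mulP (p q : Int × Int) : Int × Int :=
  (p.1 * (q.1 + q.2) + p.2 * q.1, p.1 * q.1 + p.2 * q.2)

-- Source B's `go`: top-down recursion, combining the factors MSB first
def goP (m : Int) (e : Int × Int) : Int × Int :=
  if _h : m ≤ 0 then (0, 1)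
  else
    let rest := goP (PySem.Int.floordiv m 2) (e.1 * e.1 + 2 * e.2 * e.2, e.1 * e.1 + e.2 * e.2)
    if PySem.Int.mod m 2 = 1 then mulP rest e else rest
termination_by m.toNat
decreasing_by
  have : PySem.Int.floordiv m 2 = m / 2 := PySem.Int.floordiv_eq_ediv_of_pos (by omega)
  omega

def f_alt (n : Int) : Int := (goP n (1, 0)).1

-- ===== PRECONDITION & SPEC =====
def Spec_f (n : Int) (out : Int) : Prop := out = f_alt n
instance (n : Int) (out : Int) : Decidable (Spec_f n out) := by unfold Spec_f; infer_instance

-- ===== CLAIM (what is proved, stated in full; the proofs are below) =====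
def Claim_equal_f : Prop := ∀ (n : Int), Dom_f n → Spec_f n (f n)

-- ===== LEMMAS AND PROOFS =====
lemma mulP_assoc (p q r : Int × Int) : mulP (mulP p q) r = mulP p (mulP q r) := by
  simp only [mulP, Prod.mk.injEq]; constructor <;> ring

-- invariant: A's loop from state (ra, rb, a, b) returns the first component of
-- B's MSB-first product of the remaining factors, multiplied by the accumulator (ra, rb)
lemma key : ∀ (k : Nat) (n ra rb a b : Int), n.toNat = k →
    fLoop n ra rb a b = (mulP (goP n (a, b)) (ra, rb)).1 := by
  intro k
  induction k using Nat.strong_induction_on with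
  | _ k ih =>
    intro n ra rb a b hk
    by_cases h : n > 0
    · have hfd : PySem.Int.floordiv n 2 = n / 2 :=
        PySem.Int.floordiv_eq_ediv_of_pos (by omega)
      have hm : PySem.Int.mod n 2 = n % 2 :=
        PySem.Int.mod_eq_emod_of_pos (by omega)
      have hlt : (n / 2).toNat < k := by omega
      rw [fLoop, dif_pos h, goP, dif_neg (by omega : ¬ n ≤ 0), hfd, hm]
      have hsq : (a * a + 2 * b * b, a * a + b * b) = (a * a + b * b * 2, a * a + b * b) := by
        simp only [Prod.mk.injEq]; exact ⟨by ring, trivial⟩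
      have h2 : n % 2 = 0 ∨ n % 2 = 1 := by omega
      rcases h2 with h2 | h2 <;> rw [h2] <;> norm_num
      · -- bit 0: accumulator unchanged, same remaining product
        have := ih _ hlt (n / 2) ra rb (a * a + b * b * 2) (a * a + b * b) rfl
        rw [this, hsq]
      · -- bit 1: A multiplies (a,b) into the accumulator now, B multiplies it last
        have := ih _ hlt (n / 2) (ra * a + rb * a + ra * b) (ra * a + rb * b)
          (a * a + b * b * 2) (a * a + b * b) rfl
        rw [this, hsq, mulP_assoc]
        have hacc : mulP (a, b) (ra, rb) = (ra * a + rb * a + ra * b, ra * a + rb * b) := by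
          simp only [mulP, Prod.mk.injEq]; constructor <;> ring
        rw [hacc]
    · rw [fLoop, dif_neg h, goP, dif_pos (by omega : n ≤ 0)]
      simp [mulP]

-- ===== VERDICT (by name: the statement is the Claim_ definition above) =====
theorem f_spec : Claim_equal_f := by
  intro n _
  show f n = f_alt n
  rw [f, key n.toNat n 0 1 1 0 rfl, f_alt]
  simp [mulP]
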